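-- pv_equiv track=rewrite | github.com/PaigeDavidson/CodingProjects | CS1400/Davidson-Paige-Unit5/modules/wordinator.py | __mixWords
-- ===== SOURCE A (Python) =====
-- def __mixWords(wordinator1, wordinator2):
--     string = " "
--     for i in range(0, min(len(wordinator1), len(wordinator2))):
--         string = string + wordinator1[i] + wordinator2[i]
--     if len(wordinator1) > len(wordinator2):
--         end = wordinator1[len(wordinator2): len(wordinator1)]
--         string = string + end
--     else:
--         end = wordinator2[len(wordinator1): len(wordinator2)]
--         string = string + end
--     return string.title()
-- ===== SOURCE B (Python) =====
-- def __mixWords(wordinator1, wordinator2):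
--     m = min(len(wordinator1), len(wordinator2))
--     out = [" "] * (1 + 2 * m)
--     out[1::2] = wordinator1[:m]
--     out[2::2] = wordinator2[:m]
--     out.extend(wordinator1[m:])
--     out.extend(wordinator2[m:])
--     return "".join(out).title()
-- ===== Notes on version B (the rewrite author's own statement) =====
-- stated objective: faster
-- what changed: B preallocates a single output buffer of the final size and fills it with two strided slice assignments (out[1::2], out[2::2]) plus unconditional tail extends, instead of A's per-index loop of string concatenations and explicit length-comparison branch.
import Mathlib
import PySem

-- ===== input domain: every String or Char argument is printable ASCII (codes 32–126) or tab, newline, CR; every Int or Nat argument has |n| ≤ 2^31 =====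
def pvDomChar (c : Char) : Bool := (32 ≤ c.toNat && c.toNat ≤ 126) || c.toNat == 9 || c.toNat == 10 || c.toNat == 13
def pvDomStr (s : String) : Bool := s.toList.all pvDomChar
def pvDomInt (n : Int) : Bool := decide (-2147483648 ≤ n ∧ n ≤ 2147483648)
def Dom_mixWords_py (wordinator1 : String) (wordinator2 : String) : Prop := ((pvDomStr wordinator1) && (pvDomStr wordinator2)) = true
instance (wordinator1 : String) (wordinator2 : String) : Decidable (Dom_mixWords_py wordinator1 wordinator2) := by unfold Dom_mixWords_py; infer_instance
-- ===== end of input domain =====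

-- B preallocates the output buffer and fills it with two strided slice assignments
-- (out[1::2], out[2::2]) instead of A's per-index loop and length-comparison branch;
-- objective: faster (no repeated string concatenation).

-- shared helper: port of str.title() — exact on ASCII, where 'cased' = isalpha;
-- a character is uppercased iff the previous character is not cased, else lowercased.
def pyTitle (cs : List Char) : List Char :=
  (cs.foldl
    (fun (acc : List Char × Bool) c =>
      (acc.1 ++ [if acc.2 then PySem.Chars.lowerChar c else PySem.Chars.upperChar c],
       PySem.Chars.isalpha c))
    (([] : List Char), false)).1

-- ===== PORT A =====
def mixWords_py (wordinator1 : String) (wordinator2 : String) : String :=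
  let l1 := wordinator1.toList
  let l2 := wordinator2.toList
  let string : List Char := [' ']
  -- for i in range(0, min(len(w1), len(w2))): string = string + w1[i] + w2[i]
  -- (i is always in range here, so w1[i]/w2[i] is pyGetD)
  let string := (PySem.List.pyRange 0 (min (l1.length : Int) (l2.length : Int)) 1).foldl
    (fun s i => s ++ [PySem.List.pyGetD l1 i ' '] ++ [PySem.List.pyGetD l2 i ' ']) string
  let string :=
    if (l1.length : Int) > (l2.length : Int) then
      string ++ PySem.List.slice l1 (some (l2.length : Int)) (some (l1.length : Int))
    else
      string ++ PySem.List.slice l2 (some (l1.length : Int)) (some (l2.length : Int))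
  String.ofList (pyTitle string)

-- ===== PORT B =====
-- out[start::2] = vs — strided slice assignment, ported by hand, exact:
-- writes vs at positions start, start+2, … (length always matches in B).
def assignStride2 (out : List Char) (start : Nat) (vs : List Char) : List Char :=
  match vs with
  | [] => out
  | v :: vs => assignStride2 (out.set start v) (start + 2) vs

def mixWords_py_alt (wordinator1 : String) (wordinator2 : String) : String :=
  let l1 := wordinator1.toList
  let l2 := wordinator2.toList
  let m := min l1.length l2.length
  -- out = [" "] * (1 + 2 * m)
  let out := List.replicate (1 + 2 * m) ' '
  -- out[1::2] = w1[:m]; out[2::2] = w2[:m]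
  let out := assignStride2 out 1 (l1.take m)
  let out := assignStride2 out 2 (l2.take m)
  -- out.extend(w1[m:]); out.extend(w2[m:])
  let out := out ++ l1.drop m ++ l2.drop m
  String.ofList (pyTitle out)

-- ===== PRECONDITION & SPEC =====
def Spec_mixWords_py (wordinator1 : String) (wordinator2 : String) (out : String) : Prop := out = mixWords_py_alt wordinator1 wordinator2
instance (wordinator1 : String) (wordinator2 : String) (out : String) : Decidable (Spec_mixWords_py wordinator1 wordinator2 out) := by unfold Spec_mixWords_py; infer_instance

-- ===== CLAIM (what is proved, stated in full; the proofs are below) =====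
def Claim_equal_mixWords_py : Prop := ∀ (wordinator1 : String) (wordinator2 : String), Dom_mixWords_py wordinator1 wordinator2 → Spec_mixWords_py wordinator1 wordinator2 (mixWords_py wordinator1 wordinator2)

-- ===== LEMMAS AND PROOFS =====

-- A's index loop over range(0, min(len1,len2)) produces exactly the interleaving of the zip.
theorem interleave_fold (l1 l2 : List Char) (init : List Char) :
    (PySem.List.pyRange 0 (min (l1.length : Int) (l2.length : Int)) 1).foldl
      (fun s i => s ++ [PySem.List.pyGetD l1 i ' '] ++ [PySem.List.pyGetD l2 i ' ']) init
    = init ++ (l1.zip l2).flatMap (fun p => [p.1, p.2]) := by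
  have hmin : (min (l1.length : Int) (l2.length : Int)) = PySem.List.len (l1.zip l2) := by
    simp [PySem.List.len_eq, List.length_zip]
  rw [hmin]
  have hcongr :
      (PySem.List.pyRange 0 (PySem.List.len (l1.zip l2)) 1).foldl
        (fun s i => s ++ [PySem.List.pyGetD l1 i ' '] ++ [PySem.List.pyGetD l2 i ' ']) init
      = (PySem.List.pyRange 0 (PySem.List.len (l1.zip l2)) 1).foldl
        (fun s i => s ++ [(PySem.List.pyGetD (l1.zip l2) i (' ', ' ')).1,
                          (PySem.List.pyGetD (l1.zip l2) i (' ', ' ')).2]) init := by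
    apply PySem.List.foldl_congr_mem
    intro acc x hx
    rw [PySem.List.mem_pyRange_one] at hx
    obtain ⟨h0, hlt⟩ := hx
    have hlen : (l1.zip l2).length = min l1.length l2.length := List.length_zip
    have hltz : x < ((l1.zip l2).length : Int) := by
      rw [PySem.List.len_eq] at hlt; exact_mod_cast hlt
    have hlt1 : x < (l1.length : Int) := by omega
    have hlt2 : x < (l2.length : Int) := by omega
    rw [PySem.List.pyGetD_eq_getElem _ _ h0 hltz,
        PySem.List.pyGetD_eq_getElem _ _ h0 hlt1,
        PySem.List.pyGetD_eq_getElem _ _ h0 hlt2]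
    simp [List.getElem_zip]
  rw [hcongr,
      PySem.List.foldl_pyRange_zero_pyGetD (l1.zip l2) (' ', ' ')
        (fun s p => s ++ [p.1, p.2]) init]
  have := PySem.List.foldl_append_eq_flatMap (fun p : Char × Char => [p.1, p.2]) (l1.zip l2) init
  simpa using this

-- a strided assignment at position k+2 leaves the first two cells alone
theorem assignStride2_cons2 (x y : Char) (vs : List Char) (rest : List Char) (k : Nat) :
    assignStride2 (x :: y :: rest) (k + 2) vs = x :: y :: assignStride2 rest k vs := by
  induction vs generalizing rest k with
  | nil => simp [assignStride2]
  | cons v vs ih =>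
    show assignStride2 ((x :: y :: rest).set (k + 2) v) (k + 2 + 2) vs = _
    have hset : (x :: y :: rest).set (k + 2) v = x :: y :: rest.set k v := by
      simp [List.set]
    rw [hset]
    have : k + 2 + 2 = (k + 2) + 2 := rfl
    rw [this, ih (rest.set k v) (k + 2)]
    rfl

-- out[1::2] = a over a fresh buffer yields the chars of a separated by spaces
theorem assignStride2_fill1 (a : List Char) :
    assignStride2 (' ' :: List.replicate (2 * a.length) ' ') 1 a
      = ' ' :: a.flatMap (fun c => [c, ' ']) := by
  induction a with
  | nil => simp [assignStride2]
  | cons c a ih =>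
    have hrep : List.replicate (2 * (c :: a).length) ' '
        = ' ' :: ' ' :: List.replicate (2 * a.length) ' ' := by
      simp [List.length_cons, List.replicate_succ, Nat.mul_succ]
    rw [hrep]
    show assignStride2 ((' ' :: ' ' :: ' ' :: List.replicate (2 * a.length) ' ').set 1 c) 3 a = _
    have hset : (' ' :: ' ' :: ' ' :: List.replicate (2 * a.length) ' ').set 1 c
        = ' ' :: c :: ' ' :: List.replicate (2 * a.length) ' ' := by simp [List.set]
    rw [hset, show (3 : Nat) = 1 + 2 by rfl,
        assignStride2_cons2 ' ' c a (' ' :: List.replicate (2 * a.length) ' ') 1, ih]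
    simp

-- out[2::2] = b over the space slots completes the interleaving
theorem assignStride2_fill2 (a : List Char) :
    ∀ (b : List Char), a.length = b.length → ∀ (x : Char),
    assignStride2 (x :: a.flatMap (fun c => [c, ' '])) 2 b
      = x :: (a.zip b).flatMap (fun p => [p.1, p.2]) := by
  induction a with
  | nil =>
    intro b hb x
    cases b with
    | nil => simp [assignStride2]
    | cons d b => simp at hb
  | cons c a ih =>
    intro b hb x
    cases b with
    | nil => simp at hb
    | cons d b =>
      have hlen : a.length = b.length := by simpa using hb
      show assignStride2 ((x :: c :: ' ' :: a.flatMap (fun c => [c, ' '])).set 2 d) 4 b = _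
      have hset : (x :: c :: ' ' :: a.flatMap (fun c => [c, ' '])).set 2 d
          = x :: c :: d :: a.flatMap (fun c => [c, ' ']) := by simp [List.set]
      rw [hset, show (4 : Nat) = 2 + 2 by rfl,
          assignStride2_cons2 x c b (d :: a.flatMap (fun c => [c, ' '])) 2,
          ih b hlen d]
      simp

-- zipping the two truncated prefixes is zipping the whole strings
theorem zip_take_min : ∀ (l1 l2 : List Char),
    (l1.take (min l1.length l2.length)).zip (l2.take (min l1.length l2.length))
      = l1.zip l2
  | [], l2 => by simp
  | a :: l1, [] => by simp
  | a :: l1, b :: l2 => by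
    simp only [List.length_cons, Nat.succ_min_succ, List.take_succ_cons, List.zip_cons_cons]
    rw [zip_take_min l1 l2]

theorem mixWords_py_spec : Claim_equal_mixWords_py := by
  intro w1 w2 _
  unfold Spec_mixWords_py mixWords_py mixWords_py_alt
  set l1 := w1.toList
  set l2 := w2.toList
  set m := min l1.length l2.length with hm
  simp only [interleave_fold]
  -- rewrite B's buffer construction into ' ' :: interleaving
  have hlen1 : (l1.take m).length = m := by
    simp [hm]
  have hbuf : List.replicate (1 + 2 * m) ' '
      = ' ' :: List.replicate (2 * (l1.take m).length) ' ' := by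
    rw [hlen1]
    rw [show 1 + 2 * m = (2 * m) + 1 by omega]
    simp [List.replicate_succ]
  have hfill2 := assignStride2_fill2 (l1.take m) (l2.take m)
    (by simp [hm]) ' '
  have hB : assignStride2 (assignStride2 (List.replicate (1 + 2 * m) ' ') 1 (l1.take m)) 2
        (l2.take m)
      = ' ' :: (l1.zip l2).flatMap (fun p => [p.1, p.2]) := by
    rw [hbuf, assignStride2_fill1 (l1.take m), hfill2, zip_take_min]
  rw [hB]
  -- tails
  by_cases h : (l1.length : Int) > (l2.length : Int)
  · rw [if_pos h, PySem.List.slice_toNat l1 (by positivity) (by positivity)]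
    have hm2 : min l1.length l2.length = l2.length := by omega
    have key : List.drop (min l1.length l2.length) l1 ++ List.drop (min l1.length l2.length) l2
        = List.take (l1.length - l2.length) (List.drop l2.length l1) := by
      rw [hm2, List.drop_length, List.append_nil]
      exact (List.take_of_length_le (by simp)).symm
    simp only [List.append_assoc, key]
    simp
  · rw [if_neg h, PySem.List.slice_toNat l2 (by positivity) (by positivity)]
    have hm1 : min l1.length l2.length = l1.length := by omega
    have key : List.drop (min l1.length l2.length) l1 ++ List.drop (min l1.length l2.length) l2
        = List.take (l2.length - l1.length) (List.drop l1.length l2) := by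
      rw [hm1, List.drop_length, List.nil_append]
      exact (List.take_of_length_le (by simp)).symm
    simp only [List.append_assoc, key]
    simp
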